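-- pv_equiv track=rewrite | github.com/syanle/ts-commercials-remover | commercials_remover.py | smooth_and_compress
-- ===== SOURCE A (Python) =====
-- from itertools import groupby
--
-- def smooth_and_compress(frame_list):
--     groups = [(k, sum(1 for i in g)) for k,g in groupby(frame_list)]
--     # to find outliers
--     too_small_group = 600
--     for index, group in enumerate(groups):
--         # no more than 5 consecutive mis-recognized frames in a group (sliding window)
--         if group[1] < too_small_group and group[0] == 1:
--             groups[index] = (0, groups[index][1])
--     # flatten and re-group
--     groups = uncompressed_groups(groups)
--     groups = [(k, sum(1 for i in g)) for k,g in groupby(groups)]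
--     # fix #3, must re-check in a new loop
--     # invert small groups of 0s in ads
--     for index, group in enumerate(groups):
--         # no more than 5 consecutive mis-recognized frames in a group (sliding window)
--         if group[1] < too_small_group and group[0] == 0:
--             groups[index] = (1, groups[index][1])
--     # compress to list of sets
--     compressed_groups = []
--     for group in groups:
--         if len(compressed_groups) == 0:
--             compressed_groups.append(group)
--             last_group = group
--         elif group[0] == last_group[0]:
--             compressed_groups[-1] = (compressed_groups[-1][0], compressed_groups[-1][1] + group[1])
--             last_group = compressed_groups[-1]
--         else:
--             compressed_groups.append(group)
--             last_group = group
--     return compressed_groups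
--
-- def uncompressed_groups(compressed_groups):
--     # uncompress to list of list
--     list_of_modified_list = [[i[0] for j in range(i[1])] for i in compressed_groups]
--     # flat the list of list: reshape
--     flatted_list = sum(list_of_modified_list, [])
--     return flatted_list
-- ===== SOURCE B (Python) =====
-- def smooth_and_compress(frame_list):
--     # Operate on run-length groups directly: one RLE pass, relabel + merge
--     # adjacent equal keys on the groups; never re-expand to the frame list.
--     runs = _runs(frame_list)
--     runs = _merge([(0, c) if c < 600 and k == 1 else (k, c) for k, c in runs])
--     runs = _merge([(1, c) if c < 600 and k == 0 else (k, c) for k, c in runs])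
--     return runs
--
-- def _runs(xs):
--     out = []
--     for x in xs:
--         if out and out[-1][0] == x:
--             out[-1] = (x, out[-1][1] + 1)
--         else:
--             out.append((x, 1))
--     return out
--
-- def _merge(groups):
--     out = []
--     for k, c in groups:
--         if out and out[-1][0] == k:
--             out[-1] = (k, out[-1][1] + c)
--         else:
--             out.append((k, c))
--     return out
-- ===== Notes on version B (the rewrite author's own statement) =====
-- stated objective: faster
-- what changed: B run-length encodes once and does the two relabel passes by merging adjacent equal-key groups directly, eliminating A's re-expansion to the full frame list (whose sum-based list flattening is quadratic in the number of groups) and its second groupby.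
import Mathlib
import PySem

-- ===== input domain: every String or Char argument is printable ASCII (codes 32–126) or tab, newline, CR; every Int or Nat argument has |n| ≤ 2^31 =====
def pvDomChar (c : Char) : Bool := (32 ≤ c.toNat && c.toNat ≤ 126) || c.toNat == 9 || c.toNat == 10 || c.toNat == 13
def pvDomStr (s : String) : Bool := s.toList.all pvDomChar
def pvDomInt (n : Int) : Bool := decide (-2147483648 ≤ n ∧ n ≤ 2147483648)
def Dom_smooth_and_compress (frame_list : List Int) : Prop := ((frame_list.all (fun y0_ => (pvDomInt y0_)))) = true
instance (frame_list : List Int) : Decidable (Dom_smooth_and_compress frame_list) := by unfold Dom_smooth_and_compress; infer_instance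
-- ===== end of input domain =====

-- B replaces A's flatten-and-regroup (whose sum-based flattening is quadratic) by merging
-- adjacent equal-key run-length groups directly; asymptotically faster (O(n) vs O(n^2)).

-- ===== PORT A =====
-- groupby(frame_list) with sum(1 for i in g): left scan keeping the growing group
-- list reversed (Python appends / mutates the last element; here the accumulator head).
def pvGroupbyA (xs : List Int) : List (Int × Int) :=
  (xs.foldl (fun groups x =>
    match groups with
    | (k, c) :: rest => if k = x then (k, c + 1) :: rest else (x, 1) :: (k, c) :: rest
    | [] => [(x, 1)]) []).reverse

-- [[i[0] for j in range(i[1])] for i in compressed_groups]; sum(..., [])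
def uncompressed_groups (compressed_groups : List (Int × Int)) : List Int :=
  (compressed_groups.map (fun i => (PySem.List.pyRange 0 i.2 1).map (fun _ => i.1))).foldl
    (· ++ ·) []

def smooth_and_compress (frame_list : List Int) : List (Int × Int) :=
  let groups := pvGroupbyA frame_list
  -- first relabel loop (in-place update of each index = map)
  let groups := groups.map (fun group =>
    if group.2 < 600 ∧ group.1 = 1 then ((0 : Int), group.2) else group)
  -- flatten and re-group
  let groups := pvGroupbyA (uncompressed_groups groups)
  -- second relabel loop
  let groups := groups.map (fun group =>
    if group.2 < 600 ∧ group.1 = 0 then ((1 : Int), group.2) else group)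
  -- final compress loop; compressed_groups kept reversed (Python mutates [-1])
  (groups.foldl (fun compressed group =>
    match compressed with
    | [] => [group]
    | (k, c) :: rest => if group.1 = k then (k, c + group.2) :: rest
                        else group :: (k, c) :: rest) []).reverse

-- ===== PORT B =====
-- _runs: one RLE pass over the frames (out[-1] mutation = accumulator head, reversed)
def pvRunsB (xs : List Int) : List (Int × Int) :=
  (xs.foldl (fun out x =>
    match out with
    | (k, c) :: rest => if k = x then (x, c + 1) :: rest else (x, 1) :: (k, c) :: rest
    | [] => [(x, 1)]) []).reverse

-- _merge: merge adjacent equal-key groups, summing counts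
def pvMergeB (groups : List (Int × Int)) : List (Int × Int) :=
  (groups.foldl (fun out g =>
    match out with
    | (k, c) :: rest => if k = g.1 then (g.1, c + g.2) :: rest else g :: (k, c) :: rest
    | [] => [g]) []).reverse

def smooth_and_compress_alt (frame_list : List Int) : List (Int × Int) :=
  let runs := pvRunsB frame_list
  let runs := pvMergeB (runs.map (fun g =>
    if g.2 < 600 ∧ g.1 = 1 then ((0 : Int), g.2) else g))
  pvMergeB (runs.map (fun g =>
    if g.2 < 600 ∧ g.1 = 0 then ((1 : Int), g.2) else g))

-- ===== PRECONDITION & SPEC =====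
def Spec_smooth_and_compress (frame_list : List Int) (out : List (Int × Int)) : Prop := out = smooth_and_compress_alt frame_list
instance (frame_list : List Int) (out : List (Int × Int)) : Decidable (Spec_smooth_and_compress frame_list out) := by unfold Spec_smooth_and_compress; infer_instance

-- ===== CLAIM (what is proved, stated in full; the proofs are below) =====
def Claim_equal_smooth_and_compress : Prop := ∀ (frame_list : List Int), Dom_smooth_and_compress frame_list → Spec_smooth_and_compress frame_list (smooth_and_compress frame_list)

-- ===== LEMMAS AND PROOFS =====

-- canonical recursive merge-adjacent-equal-keys, the common spec of both ports
def mcons (g : Int × Int) : List (Int × Int) → List (Int × Int)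
  | [] => [g]
  | (k, c) :: t => if k = g.1 then (g.1, g.2 + c) :: t else g :: (k, c) :: t

def mrg : List (Int × Int) → List (Int × Int)
  | [] => []
  | g :: gs => mcons g (mrg gs)

-- the shared fold step of both ports' merge loops
def mstep (out : List (Int × Int)) (g : Int × Int) : List (Int × Int) :=
  match out with
  | (k, c) :: rest => if k = g.1 then (g.1, c + g.2) :: rest else g :: (k, c) :: rest
  | [] => [g]

theorem mcons_head (g : Int × Int) (m : List (Int × Int)) :
    ∃ d t, mcons g m = (g.1, d) :: t := by
  cases m with
  | nil => exact ⟨g.2, [], rfl⟩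
  | cons h t =>
    obtain ⟨k, c⟩ := h
    by_cases hk : k = g.1
    · exact ⟨g.2 + c, t, by simp [mcons, hk]⟩
    · exact ⟨g.2, (k, c) :: t, by simp [mcons, hk]⟩

theorem mcons_add (k : Int) (c c' : Int) (m : List (Int × Int)) :
    mcons (k, c + c') m = mcons (k, c') (mcons (k, c) m) := by
  cases m with
  | nil => simp [mcons, add_comm]
  | cons h t =>
    obtain ⟨k2, c2⟩ := h
    by_cases hk : k2 = k
    · subst hk
      simp [mcons]
      ring
    · simp [mcons, hk]
      ring

theorem foldl_mstep (gs : List (Int × Int)) (g : Int × Int) (rest : List (Int × Int)) :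
    List.foldl mstep (g :: rest) gs = (mrg (g :: gs)).reverse ++ rest := by
  induction gs generalizing g rest with
  | nil => simp [mrg, mcons]
  | cons g' gs' ih =>
    obtain ⟨k, c⟩ := g
    obtain ⟨k', c'⟩ := g'
    by_cases hk : k = k'
    · subst hk
      have h1 : List.foldl mstep ((k, c) :: rest) ((k, c') :: gs')
          = List.foldl mstep ((k, c + c') :: rest) gs' := by
        simp [List.foldl_cons, mstep]
      rw [h1, ih]
      have : mrg ((k, c + c') :: gs') = mrg ((k, c) :: (k, c') :: gs') := by
        show mcons (k, c + c') (mrg gs') = mcons (k, c) (mcons (k, c') (mrg gs'))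
        rw [show c + c' = c' + c from add_comm c c']
        exact mcons_add k c' c (mrg gs')
      rw [this]
    · have h1 : List.foldl mstep ((k, c) :: rest) ((k', c') :: gs')
          = List.foldl mstep ((k', c') :: (k, c) :: rest) gs' := by
        simp [List.foldl_cons, mstep, hk]
      rw [h1, ih]
      have h2 : mrg ((k, c) :: (k', c') :: gs')
          = (k, c) :: mrg ((k', c') :: gs') := by
        obtain ⟨d, t, hdt⟩ := mcons_head (k', c') (mrg gs')
        show mcons (k, c) (mcons (k', c') (mrg gs')) = (k, c) :: mcons (k', c') (mrg gs')
        rw [hdt]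
        simp [mcons, Ne.symm hk]
      rw [h2]
      simp

theorem foldl_mstep_nil (gs : List (Int × Int)) :
    (List.foldl mstep [] gs).reverse = mrg gs := by
  cases gs with
  | nil => rfl
  | cons g gs' =>
    have : List.foldl mstep [] (g :: gs') = List.foldl mstep [g] gs' := by
      simp [List.foldl_cons, mstep]
    rw [this, foldl_mstep]
    simp

theorem pvMergeB_eq_mrg (gs : List (Int × Int)) : pvMergeB gs = mrg gs := by
  have hstep : (fun (out : List (Int × Int)) (g : Int × Int) =>
      match out with
      | (k, c) :: rest => if k = g.1 then (g.1, c + g.2) :: rest else g :: (k, c) :: rest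
      | [] => [g]) = mstep := by
    funext out g; cases out <;> rfl
  unfold pvMergeB
  rw [hstep, foldl_mstep_nil]

-- both RLE passes equal mrg over unit-count pairs
theorem rle_eq_mrg (xs : List Int)
    (step : List (Int × Int) → Int → List (Int × Int))
    (hstep : ∀ out x, step out x = mstep out (x, 1)) :
    (xs.foldl step []).reverse = mrg (xs.map (fun x => (x, 1))) := by
  have hfe : step = fun out x => mstep out (x, 1) := funext fun o => funext fun x => hstep o x
  have : xs.foldl step [] = (xs.map (fun x => (x, 1))).foldl mstep [] := by
    rw [hfe, List.foldl_map]
  rw [this, foldl_mstep_nil]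

theorem pvRunsB_eq (xs : List Int) :
    pvRunsB xs = mrg (xs.map (fun x => (x, 1))) := by
  unfold pvRunsB
  apply rle_eq_mrg
  intro out x
  cases out with
  | nil => rfl
  | cons h t =>
    obtain ⟨k, c⟩ := h
    by_cases hk : k = x <;> simp [mstep, hk]

theorem pvGroupbyA_eq (xs : List Int) :
    pvGroupbyA xs = mrg (xs.map (fun x => (x, 1))) := by
  unfold pvGroupbyA
  apply rle_eq_mrg
  intro out x
  cases out with
  | nil => rfl
  | cons h t =>
    obtain ⟨k, c⟩ := h
    by_cases hk : k = x <;> simp [mstep, hk]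

-- expansion of groups back to a flat list
def expandG (gs : List (Int × Int)) : List Int :=
  gs.flatMap (fun g => List.replicate g.2.toNat g.1)

theorem foldl_append_eq (L : List (List Int)) (a : List Int) :
    L.foldl (· ++ ·) a = a ++ L.flatten := by
  induction L generalizing a with
  | nil => simp
  | cons h t ih => simp [List.foldl_cons, ih]

theorem uncompressed_groups_eq (gs : List (Int × Int)) :
    uncompressed_groups gs = expandG gs := by
  unfold uncompressed_groups expandG
  rw [foldl_append_eq]
  simp only [List.nil_append, List.flatten_eq_flatMap, List.flatMap_map]
  congr 1
  funext g
  have h1 : (PySem.List.pyRange 0 g.2 1).map (fun _ => g.1)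
      = List.replicate (PySem.List.pyRange 0 g.2 1).length g.1 := by
    simp [List.map_const']
  rw [h1, PySem.List.length_pyRange_one]
  norm_num

theorem mrg_replicate (n : ℕ) (hn : 1 ≤ n) (k : Int) (ys : List Int) :
    mrg ((List.replicate n k ++ ys).map (fun x => (x, 1)))
      = mcons (k, (n : Int)) (mrg (ys.map (fun x => (x, 1)))) := by
  induction n with
  | zero => omega
  | succ m ih =>
    by_cases hm : 1 ≤ m
    · have : List.replicate (m + 1) k ++ ys = k :: (List.replicate m k ++ ys) := by
        simp [List.replicate_succ]
      rw [this]
      simp only [List.map_cons, mrg]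
      rw [ih hm, ← mcons_add]
      have hc : (m : Int) + 1 = ((m + 1 : ℕ) : Int) := by push_cast; ring
      rw [hc]
    · have hm0 : m = 0 := by omega
      subst hm0
      simp [mrg, mcons]

theorem mrg_expand (gs : List (Int × Int)) (hpos : ∀ g ∈ gs, 1 ≤ g.2) :
    mrg ((expandG gs).map (fun x => (x, 1))) = mrg gs := by
  induction gs with
  | nil => rfl
  | cons g t ih =>
    obtain ⟨a, b⟩ := g
    have hg : 1 ≤ b := hpos (a, b) (by simp)
    have hn : 1 ≤ b.toNat := by omega
    have hsplit : expandG ((a, b) :: t) = List.replicate b.toNat a ++ expandG t := by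
      simp [expandG]
    rw [hsplit, mrg_replicate b.toNat hn a (expandG t),
        ih (fun x hx => hpos x (by simp [hx]))]
    have hcast : ((b.toNat : Int)) = b := by omega
    rw [hcast]
    rfl

theorem mcons_pos (g : Int × Int) (m : List (Int × Int)) (hg : 1 ≤ g.2)
    (hm : ∀ h ∈ m, 1 ≤ h.2) : ∀ h ∈ mcons g m, 1 ≤ h.2 := by
  cases m with
  | nil => simpa [mcons] using hg
  | cons h0 t =>
    obtain ⟨k, c⟩ := h0
    have hc : 1 ≤ c := hm (k, c) (by simp)
    by_cases hk : k = g.1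
    · simp only [mcons, hk, if_pos]
      intro h hh
      rcases List.mem_cons.mp hh with h1 | h2
      · subst h1; simp; omega
      · exact hm h (by simp [h2])
    · simp only [mcons, if_neg hk]
      intro h hh
      rcases List.mem_cons.mp hh with h1 | h2
      · subst h1; exact hg
      · exact hm h h2

theorem mrg_pos (gs : List (Int × Int)) (hpos : ∀ g ∈ gs, 1 ≤ g.2) :
    ∀ h ∈ mrg gs, 1 ≤ h.2 := by
  induction gs with
  | nil => simp [mrg]
  | cons g t ih =>
    exact mcons_pos g (mrg t) (hpos g (by simp))
      (ih (fun x hx => hpos x (by simp [hx])))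

-- ===== VERDICT (by name: the statement is the Claim_ definition above) =====
theorem smooth_and_compress_spec : Claim_equal_smooth_and_compress := by
  intro frame_list _
  unfold Spec_smooth_and_compress smooth_and_compress smooth_and_compress_alt
  simp only []
  -- rewrite A's final compress loop as mrg
  have hstepA : (fun (compressed : List (Int × Int)) (group : Int × Int) =>
      match compressed with
      | [] => [group]
      | (k, c) :: rest => if group.1 = k then (k, c + group.2) :: rest
                          else group :: (k, c) :: rest) = mstep := by
    funext out g
    cases out with
    | nil => rfl
    | cons h t =>
      obtain ⟨k, c⟩ := h
      by_cases hk : k = g.1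
      · subst hk; simp [mstep]
      · simp [mstep, hk, Ne.symm hk]
  rw [hstepA, foldl_mstep_nil, pvMergeB_eq_mrg, pvMergeB_eq_mrg,
      pvGroupbyA_eq, pvGroupbyA_eq, pvRunsB_eq, uncompressed_groups_eq]
  congr 1
  congr 1
  apply mrg_expand
  intro g hg
  simp only [List.mem_map] at hg
  obtain ⟨g0, hg0, rfl⟩ := hg
  have h0 : 1 ≤ g0.2 :=
    mrg_pos _ (by simp) g0 hg0
  split <;> simpa using h0
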